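-- pv_equiv track=rewrite | github.com/evan42mr/readPdf_pycharm | readPdf/pdf_BySentence_v1.py | extract_content_table
-- ===== SOURCE A (Python) =====
-- def extract_content_table(text):
--     # Number of the line where table of contents ends
--     tab_end_line = 0
--     # Flag for the start of the table of contents
--     tabStart = False
--     # Flag for the end of the table of contents
--     tabEnd = False
--     # Count lines after expected end of the table of contents
--     cnt_lines_after_expected_end = 0
--
--     lst_idx_tab = []
--     for i, line in enumerate(text.splitlines()):
--
--         count_dots = 0
--         temp_line = ''
--
--         found_content_item = line.find('..........')
--
--         if not tabEnd and found_content_item != -1: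
--             tab_end_line = i
--             if not tabStart:
--                 tabStart = True
--
--             lst_idx_tab.append(line[:found_content_item])
--             cnt_lines_after_expected_end = 0
--
--         if tabStart and not tabEnd and found_content_item == -1:
--             cnt_lines_after_expected_end += 1
--             if cnt_lines_after_expected_end > 3:
--                 tabEnd = True
--                 break
--
--     return lst_idx_tab, tab_end_line
-- ===== SOURCE B (Python) =====
-- def extract_content_table(text):
--     # Build the list of (line index, prefix) for every line containing '..........',
--     # then truncate it at the first gap of >= 4 non-matching lines between entries.
--     matches = [(i, line[:pos]) for i, line in enumerate(text.splitlines())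
--                if (pos := line.find('..........')) != -1]
--     if not matches:
--         return [], 0
--     kept = [matches[0]]
--     for i, pre in matches[1:]:
--         if i - kept[-1][0] - 1 >= 4:
--             break
--         kept.append((i, pre))
--     return [pre for _, pre in kept], kept[-1][0]
-- ===== Notes on version B (the rewrite author's own statement) =====
-- stated objective: alternative
-- what changed: Replaces A's incremental tabStart/tabEnd/counter state machine with a build-then-truncate decomposition: first collect all (index, prefix) pairs for lines containing the ten-dot marker, then cut that match list at the first gap of >= 4 non-matching lines between consecutive matches.
import Mathlib
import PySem

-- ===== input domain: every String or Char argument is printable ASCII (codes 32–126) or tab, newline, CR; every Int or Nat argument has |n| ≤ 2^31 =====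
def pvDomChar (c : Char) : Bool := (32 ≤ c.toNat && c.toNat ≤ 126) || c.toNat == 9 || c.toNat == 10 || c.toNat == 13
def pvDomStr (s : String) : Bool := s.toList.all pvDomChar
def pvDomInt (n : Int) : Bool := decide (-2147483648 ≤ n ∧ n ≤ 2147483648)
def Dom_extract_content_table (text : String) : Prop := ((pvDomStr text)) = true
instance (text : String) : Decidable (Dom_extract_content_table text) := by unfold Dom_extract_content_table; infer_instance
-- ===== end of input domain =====

-- B replaces A's incremental tabStart/counter state machine by building the full match
-- list and truncating it at the first index gap ≥ 4 (objective: alternative decomposition).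


-- ===== PORT A =====
-- A's for-loop over enumerate(text.splitlines()) with state
-- (tab_end_line, tabStart, cnt_lines_after_expected_end, lst_idx_tab); 'tabEnd = True; break'
-- exits the loop immediately, so it is ported as returning the result.
def pvLoopA : List (Int × String) → Int → Bool → Int → List String → List String × Int
  | [], tel, _, _, lst => (lst, tel)
  | (i, line) :: rest, tel, tabStart, cnt, lst =>
    let found := PySem.Str.find line ".........."
    if found ≠ -1 then
      pvLoopA rest i true 0 (lst ++ [PySem.Str.slice line none (some found)])
    else if tabStart then
      if cnt + 1 > 3 then (lst, tel)
      else pvLoopA rest tel tabStart (cnt + 1) lst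
    else pvLoopA rest tel tabStart cnt lst

def extract_content_table (text : String) : List String × Int :=
  pvLoopA (PySem.List.enumerate (PySem.Str.splitlines text) 0) 0 false 0 []

-- ===== PORT B =====
-- the 'for i, pre in matches[1:]' loop of Source B; 'last' is kept[-1][0]
def pvCut : Int → List (Int × String) → List (Int × String)
  | _, [] => []
  | last, (i, pre) :: rest =>
    if i - last - 1 ≥ 4 then [] else (i, pre) :: pvCut i rest

def extract_content_table_alt (text : String) : List String × Int :=
  let ms := (PySem.List.enumerate (PySem.Str.splitlines text) 0).filterMap
    (fun p =>
      let pos := PySem.Str.find p.2 ".........."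
      if pos ≠ -1 then some (p.1, PySem.Str.slice p.2 none (some pos)) else none)
  match ms with
  | [] => ([], 0)
  | m0 :: rest =>
    let kept := m0 :: pvCut m0.1 rest
    (kept.map Prod.snd, (PySem.List.pyGetD kept (-1) (0, "")).1)

-- ===== PRECONDITION & SPEC =====
def Spec_extract_content_table (text : String) (out : List String × Int) : Prop := out = extract_content_table_alt text
instance (text : String) (out : List String × Int) : Decidable (Spec_extract_content_table text out) := by unfold Spec_extract_content_table; infer_instance

-- ===== CLAIM (what is proved, stated in full; the proofs are below) =====
def Claim_equal_extract_content_table : Prop := ∀ (text : String), Dom_extract_content_table text → Spec_extract_content_table text (extract_content_table text)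

-- ===== LEMMAS AND PROOFS =====

-- the matcher applied to an enumerated suffix
def pvMs (s : Int) (ls : List String) : List (Int × String) :=
  (PySem.List.enumerate ls s).filterMap
    (fun p =>
      let pos := PySem.Str.find p.2 ".........."
      if pos ≠ -1 then some (p.1, PySem.Str.slice p.2 none (some pos)) else none)

lemma pvMs_nil (s : Int) : pvMs s [] = [] := by simp [pvMs]

lemma pvMs_cons_pos (s : Int) (l : String) (r : List String)
    (h : PySem.Str.find l ".........." ≠ -1) :
    pvMs s (l :: r) =
      (s, PySem.Str.slice l none (some (PySem.Str.find l ".........."))) :: pvMs (s + 1) r := by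
  simp only [pvMs, PySem.List.enumerate_cons, List.filterMap_cons]
  rw [if_pos h]

lemma pvMs_cons_neg (s : Int) (l : String) (r : List String)
    (h : PySem.Str.find l ".........." = -1) :
    pvMs s (l :: r) = pvMs (s + 1) r := by
  simp only [pvMs, PySem.List.enumerate_cons, List.filterMap_cons]
  rw [if_neg (not_not_intro h)]

lemma pvMs_ge (s : Int) (ls : List String) : ∀ p ∈ pvMs s ls, s ≤ p.1 := by
  induction ls generalizing s with
  | nil => simp [pvMs_nil]
  | cons l r ih =>
    intro p hp
    by_cases h : PySem.Str.find l ".........." = -1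
    · rw [pvMs_cons_neg _ _ _ h] at hp
      have := ih (s + 1) p hp; omega
    · rw [pvMs_cons_pos _ _ _ h] at hp
      rcases List.mem_cons.mp hp with h1 | h1
      · simp [h1]
      · have := ih (s + 1) p h1; omega

lemma pvGetLastD_cons_map (p : Int × String) (c : List (Int × String)) (d : Int) :
    (List.map Prod.fst (p :: c)).getLastD d = (List.map Prod.fst c).getLastD p.1 := by
  rw [List.map_cons, List.getLastD_cons]

-- loop already started (tabStart = true), cnt = s - tel - 1 misses since the last match
lemma pvLoopA_started (ls : List String) :
    ∀ (s tel cnt : Int) (lst : List String),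
      cnt = s - tel - 1 → 0 ≤ cnt → cnt ≤ 3 →
      pvLoopA (PySem.List.enumerate ls s) tel true cnt lst =
        (lst ++ (pvCut tel (pvMs s ls)).map Prod.snd,
         ((pvCut tel (pvMs s ls)).map Prod.fst).getLastD tel) := by
  induction ls with
  | nil => intro s tel cnt lst _ _ _; simp [pvLoopA, pvMs_nil, pvCut]
  | cons l r ih =>
    intro s tel cnt lst hc h0 h3
    rw [PySem.List.enumerate_cons]
    simp only [pvLoopA]
    by_cases h : PySem.Str.find l ".........." = -1
    · rw [pvMs_cons_neg _ _ _ h, if_neg (not_not_intro h)]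
      simp only [if_true]
      by_cases h4 : cnt + 1 > 3
      · rw [if_pos h4]
        have hcut : pvCut tel (pvMs (s + 1) r) = [] := by
          cases hm : pvMs (s + 1) r with
          | nil => simp [pvCut]
          | cons p ps =>
            have hge : s + 1 ≤ p.1 := pvMs_ge (s + 1) r p (by rw [hm]; exact List.mem_cons_self ..)
            obtain ⟨pi, pp⟩ := p
            simp only [pvCut]
            rw [if_pos (by simp only [] at hge ⊢; omega)]
        rw [hcut]; simp
      · rw [if_neg h4, ih (s + 1) tel (cnt + 1) lst (by omega) (by omega) (by omega)]
    · rw [pvMs_cons_pos _ _ _ h, if_pos h,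
        ih (s + 1) s 0 _ (by omega) (by omega) (by omega)]
      simp only [pvCut]
      rw [if_neg (by omega), pvGetLastD_cons_map]
      simp [List.append_assoc]

-- loop not yet started (tabStart = false): misses are skipped until the first match
lemma pvLoopA_unstarted (ls : List String) :
    ∀ (s tel cnt : Int) (lst : List String),
      pvLoopA (PySem.List.enumerate ls s) tel false cnt lst =
        (match pvMs s ls with
         | [] => (lst, tel)
         | m0 :: rest =>
           (lst ++ m0.2 :: (pvCut m0.1 rest).map Prod.snd,
            ((pvCut m0.1 rest).map Prod.fst).getLastD m0.1)) := by
  induction ls with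
  | nil => intro s tel cnt lst; simp [pvLoopA, pvMs_nil]
  | cons l r ih =>
    intro s tel cnt lst
    rw [PySem.List.enumerate_cons]
    simp only [pvLoopA]
    by_cases h : PySem.Str.find l ".........." = -1
    · rw [pvMs_cons_neg _ _ _ h, if_neg (not_not_intro h)]
      simp only [Bool.false_eq_true, if_false]
      exact ih (s + 1) tel cnt lst
    · rw [pvMs_cons_pos _ _ _ h, if_pos h,
        pvLoopA_started r (s + 1) s 0 _ (by omega) (by omega) (by omega)]
      simp [List.append_assoc]

lemma pvLastFst (c : List (Int × String)) :
    ∀ m : Int × String,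
      ((m :: c).getLast (List.cons_ne_nil _ _)).1 = (c.map Prod.fst).getLastD m.1 := by
  induction c with
  | nil => intro m; simp
  | cons x c ih =>
    intro m
    rw [List.getLast_cons (List.cons_ne_nil _ _), List.map_cons, List.getLastD_cons]
    exact ih x

-- ===== VERDICT (by name: the statement is the Claim_ definition above) =====
theorem extract_content_table_spec : Claim_equal_extract_content_table := by
  intro text _
  show extract_content_table text = extract_content_table_alt text
  unfold extract_content_table extract_content_table_alt
  rw [pvLoopA_unstarted (PySem.Str.splitlines text) 0 0 0 []]
  have : ((PySem.List.enumerate (PySem.Str.splitlines text) 0).filterMap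
    (fun p =>
      let pos := PySem.Str.find p.2 ".........."
      if pos ≠ -1 then some (p.1, PySem.Str.slice p.2 none (some pos)) else none)) = pvMs 0 (PySem.Str.splitlines text) := rfl
  rw [this]
  cases hm : pvMs 0 (PySem.Str.splitlines text) with
  | nil => simp
  | cons m0 rest =>
    dsimp only
    rw [PySem.List.pyGetD_neg_one _ _ (List.cons_ne_nil _ _), pvLastFst]
    simp
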